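-- pv_equiv track=rewrite | github.com/arry-lee/TIS | awesometable.py | del_line
-- ===== SOURCE A (Python) =====
-- def del_line(t, start=2, end=-1, keepblank=True):
--     lines = str(t).splitlines()
--     if keepblank:
--         lines[start:end:2] = ['║' + (len(l) - 2) * ' ' + '║' for l in
--                               lines[start:end:2]]
--     else:
--         del lines[start:end:2]
--     return '\n'.join(lines)
-- ===== SOURCE B (Python) =====
-- def del_line(t, start=2, end=-1, keepblank=True):
--     lines = str(t).splitlines()
--     targets = set(range(*slice(start, end, 2).indices(len(lines))))
--     if keepblank:
--         out = ['\u2551' + (len(l) - 2) * ' ' + '\u2551' if i in targets else l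
--                for i, l in enumerate(lines)]
--     else:
--         out = [l for i, l in enumerate(lines) if i not in targets]
--     return '\n'.join(out)
-- ===== Notes on version B (the rewrite author's own statement) =====
-- stated objective: alternative
-- what changed: Replaces the built-in extended-slice assignment/deletion with an explicitly computed set of affected line indices (slice(start,end,2).indices) followed by a single pass over enumerate(lines) that blanks or skips exactly those indices.
import Mathlib
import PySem

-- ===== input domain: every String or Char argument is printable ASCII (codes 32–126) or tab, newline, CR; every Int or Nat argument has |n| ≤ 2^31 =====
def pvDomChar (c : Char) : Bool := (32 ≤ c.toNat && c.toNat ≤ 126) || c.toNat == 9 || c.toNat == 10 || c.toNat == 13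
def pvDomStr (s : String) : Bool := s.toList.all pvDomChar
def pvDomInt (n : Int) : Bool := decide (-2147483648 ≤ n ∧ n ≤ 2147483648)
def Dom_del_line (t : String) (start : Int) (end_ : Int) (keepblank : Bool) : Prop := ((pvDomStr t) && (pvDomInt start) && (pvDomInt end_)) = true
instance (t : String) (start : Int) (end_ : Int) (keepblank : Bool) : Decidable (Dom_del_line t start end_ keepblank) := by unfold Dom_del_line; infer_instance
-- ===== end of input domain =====

-- ===== PORT A =====
-- B blanks/deletes every 2nd line in lines[start:end] via an explicit index set and one pass
-- (objective: alternative decomposition, same cost).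
-- helper for both ports: Python's  '║' + (len(l) - 2) * ' ' + '║'
def pvBlank (l : List Char) : List Char := '║' :: (List.replicate (l.length - 2) ' ' ++ ['║'])

-- Port of A. The extended-slice statements are ported by hand (PySem has no slice assignment):
-- CPython's  lines[start:end:2] = repl  (equal lengths here, so no ValueError) writes repl[k] at
-- index s + 2*k for each k, s from PySlice_GetIndicesEx = PySem.List.sliceIndices; exact.
-- CPython's  del lines[start:end:2]  removes the elements at those indices; ported by erasing them
-- highest-first so lower indices are not shifted; exact. step = 2 ≠ 0, so slice? never returns none.
def del_line (t : String) (start : Int) (end_ : Int) (keepblank : Bool) : String :=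
  let lines := PySem.Chars.splitlines t.toList
  let lines' :=
    if keepblank then
      let repl := ((PySem.List.slice? lines (some start) (some end_) 2).getD []).map pvBlank
      match PySem.List.sliceIndices lines.length (some start) (some end_) 2 with
      | (s, _, _) =>
        (PySem.List.enumerate repl 0).foldl (fun acc p => acc.set (s + 2 * p.1).toNat p.2) lines
    else
      match PySem.List.sliceIndices lines.length (some start) (some end_) 2 with
      | (s, e, _) =>
        (PySem.List.pyRange s e 2).reverse.foldl (fun acc i => acc.eraseIdx i.toNat) lines
  String.ofList (PySem.Chars.join ['\n'] lines')

-- ===== PORT B =====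
-- Port of B: the affected indices as a set (set(range(*slice(start, end, 2).indices(len(lines))))),
-- then one pass over enumerate(lines).
def del_line_alt (t : String) (start : Int) (end_ : Int) (keepblank : Bool) : String :=
  let lines := PySem.Chars.splitlines t.toList
  match PySem.List.sliceIndices lines.length (some start) (some end_) 2 with
  | (s, e, _) =>
    let targets : PySem.Set Int := PySem.Set.ofList (PySem.List.pyRange s e 2)
    let out :=
      if keepblank then
        (PySem.List.enumerate lines 0).map
          (fun p => if PySem.Set.contains targets p.1 then pvBlank p.2 else p.2)
      else
        ((PySem.List.enumerate lines 0).filter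
          (fun p => !PySem.Set.contains targets p.1)).map Prod.snd
    String.ofList (PySem.Chars.join ['\n'] out)

-- ===== PRECONDITION & SPEC =====
def Spec_del_line (t : String) (start : Int) (end_ : Int) (keepblank : Bool) (out : String) : Prop := out = del_line_alt t start end_ keepblank
instance (t : String) (start : Int) (end_ : Int) (keepblank : Bool) (out : String) : Decidable (Spec_del_line t start end_ keepblank out) := by unfold Spec_del_line; infer_instance

-- ===== CLAIM (what is proved, stated in full; the proofs are below) =====
def Claim_equal_del_line : Prop := ∀ (t : String) (start : Int) (end_ : Int) (keepblank : Bool), Dom_del_line t start end_ keepblank → Spec_del_line t start end_ keepblank (del_line t start end_ keepblank)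

-- ===== LEMMAS AND PROOFS =====

-- sliceIndices with positive step 2 clamps both bounds into [0, n]
theorem pv_sliceIndices_facts (n : Nat) (a b : Option Int) :
    0 ≤ (PySem.List.sliceIndices n a b 2).1 ∧ (PySem.List.sliceIndices n a b 2).1 ≤ n ∧
    0 ≤ (PySem.List.sliceIndices n a b 2).2.1 ∧ (PySem.List.sliceIndices n a b 2).2.1 ≤ n := by
  rcases a with _ | x <;> rcases b with _ | y <;>
    simp [PySem.List.sliceIndices] <;> split_ifs <;> omega

theorem pv_filterMap_eq_map {α β : Type} (l : List α) (f : α → Option β) (g : α → β)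
    (h : ∀ x ∈ l, f x = some (g x)) : l.filterMap f = l.map g := by
  induction l with
  | nil => rfl
  | cons x t ih =>
    simp only [List.filterMap_cons, h x (by simp), List.map_cons]
    exact congrArg _ (ih fun y hy => h y (by simp [hy]))

theorem pv_find?_eq_some_of_unique {α : Type} {p : α → Bool} {l : List α} {a : α}
    (hmem : a ∈ l) (hpa : p a = true) (huniq : ∀ b ∈ l, p b = true → b = a) :
    l.find? p = some a := by
  induction l with
  | nil => cases hmem
  | cons x t ih =>
    by_cases hx : p x = true
    · have : x = a := huniq x (by simp) hx
      simp [hpa, this]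
    · have hxa : x ≠ a := fun h => hx (h ▸ hpa)
      have hmem' : a ∈ t := by
        rcases List.mem_cons.mp hmem with h | h
        · exact absurd h.symm hxa
        · exact h
      rw [List.find?_cons_of_neg hx]
      exact ih hmem' fun b hb hpb => huniq b (by simp [hb]) hpb

theorem pv_foldl_set_getElem? {α : Type} (ps : List (Nat × α)) (xs : List α) (j : Nat)
    (hlt : ∀ p ∈ ps, p.1 < xs.length) (hnd : (ps.map Prod.fst).Nodup) :
    (ps.foldl (fun a p => a.set p.1 p.2) xs)[j]? =
      match ps.find? (fun p => p.1 == j) with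
      | some p => some p.2
      | none => xs[j]? := by
  induction ps generalizing xs with
  | nil => rfl
  | cons p rest ih =>
    simp only [List.foldl_cons]
    have hnd' : (rest.map Prod.fst).Nodup := (List.nodup_cons.mp hnd).2
    have hlt' : ∀ q ∈ rest, q.1 < (xs.set p.1 p.2).length := by
      intro q hq; rw [List.length_set]; exact hlt q (by simp [hq])
    rw [ih (xs.set p.1 p.2) hlt' hnd']
    by_cases hj : p.1 = j
    · have hfind : rest.find? (fun q => q.1 == j) = none := by
        rw [List.find?_eq_none]
        intro q hq hbq
        exact (List.nodup_cons.mp hnd).1 (by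
          have : q.1 = j := by simpa using hbq
          rw [hj, ← this]; exact List.mem_map_of_mem hq)
      rw [List.find?_cons_of_pos (by simp [hj]), hfind]
      subst hj
      exact List.getElem?_set_self (hlt p (by simp))
    · rw [List.find?_cons_of_neg (by simp [hj])]
      have : (xs.set p.1 p.2)[j]? = xs[j]? := List.getElem?_set_ne hj
      cases rest.find? (fun q => q.1 == j) <;> simp [this]

theorem pv_zipIdx_range (c k : Nat) :
    (List.range c).zipIdx k = (List.range c).map (fun j => (j, j + k)) := by
  induction c with
  | zero => rfl
  | succ c ih =>
    simp only [List.range_succ, List.zipIdx_append, List.map_append, ih]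
    simp [Nat.add_comm]

theorem pv_erase_desc {α : Type} (T : List Nat) (xs : List α)
    (hpw : T.Pairwise (· < ·)) (hlt : ∀ i ∈ T, i < xs.length) :
    T.reverse.foldl (fun acc i => acc.eraseIdx i) xs =
      (xs.zipIdx.filter (fun p => !(T.contains p.2))).map Prod.fst := by
  induction T using List.reverseRecOn generalizing xs with
  | nil =>
    simp only [List.reverse_nil, List.foldl_nil]
    rw [List.filter_eq_self.mpr (by intro a _; simp), List.zipIdx_map_fst]
  | append_singleton T' m ih =>
    rcases List.pairwise_append.mp hpw with ⟨hpw', _, hTm⟩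
    have hm : m < xs.length := hlt m (by simp)
    have hlen : (xs.eraseIdx m).length = xs.length - 1 := by
      rw [List.length_eraseIdx, if_pos hm]
    rw [List.reverse_append, List.reverse_singleton, List.singleton_append, List.foldl_cons]
    rw [ih (xs.eraseIdx m) hpw' (by
      intro i hi
      have := hTm i hi m (by simp)
      omega)]
    have hA : (xs.take m).length = m := by rw [List.length_take]; omega
    -- both sides: the prefix before m is filtered the same way, position m goes (on the right),
    -- everything after survives on both sides
    have hxs : xs = xs.take m ++ xs[m] :: xs.drop (m+1) := by
      conv_lhs => rw [← List.take_append_drop m xs, List.drop_eq_getElem_cons hm]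
    rw [List.eraseIdx_eq_take_drop_succ]
    conv_rhs => rw [hxs]
    rw [List.zipIdx_append, List.zipIdx_append, hA]
    simp only [List.zipIdx_cons, List.filter_append, List.map_append, List.filter_cons,
      Nat.zero_add]
    have hmem_m : ((T' ++ [m]).contains m) = true := by simp
    rw [hmem_m]
    simp only [Bool.not_true, Bool.false_eq_true, if_false]
    have hT'lt : ∀ i ∈ T', i < m := fun i hi => hTm i hi m (by simp)
    have hkeepT : ∀ (k : Nat) (B : List α), m < k →
        ((B.zipIdx k).filter (fun p => !((T' ++ [m]).contains p.2))).map Prod.fst = B := by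
      intro k B hk
      rw [List.filter_eq_self.mpr, List.zipIdx_map_fst]
      intro p hp
      have h2 := (List.mem_zipIdx (x := p.1) (i := p.2) (by simpa using hp)).1
      simp only [Bool.not_eq_true', List.contains_eq_mem, decide_eq_false_iff_not]
      intro hmem
      rcases List.mem_append.mp hmem with h | h
      · have := hT'lt _ h; omega
      · have : p.2 = m := by simpa using h
        omega
    have hkeepT' : ∀ (k : Nat) (B : List α), m ≤ k →
        ((B.zipIdx k).filter (fun p => !(T'.contains p.2))).map Prod.fst = B := by
      intro k B hk
      rw [List.filter_eq_self.mpr, List.zipIdx_map_fst]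
      intro p hp
      have h2 := (List.mem_zipIdx (x := p.1) (i := p.2) (by simpa using hp)).1
      simp only [Bool.not_eq_true', List.contains_eq_mem, decide_eq_false_iff_not]
      intro hmem; have := hT'lt _ hmem; omega
    have hpre : (xs.take m).zipIdx.filter (fun p => !(T'.contains p.2)) =
        (xs.take m).zipIdx.filter (fun p => !((T' ++ [m]).contains p.2)) := by
      apply List.filter_congr
      intro p hp
      have h2 := (List.mem_zipIdx (x := p.1) (i := p.2) (by simpa using hp)).2.1
      rw [hA] at h2
      have hne : ([m].contains p.2) = false := by
        simp only [List.contains_eq_mem, List.mem_singleton, decide_eq_false_iff_not]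
        omega
      rw [List.contains_append, hne, Bool.or_false]
    rw [hkeepT (m+1) (xs.drop (m+1)) (by omega), hkeepT' m (xs.drop (m+1))]
    · rw [hpre]
    · omega

theorem pv_sliceIndices_step (n : Nat) (a b : Option Int) :
    (PySem.List.sliceIndices n a b 2).2.2 = 2 := by
  rcases a with _ | x <;> rcases b with _ | y <;> simp [PySem.List.sliceIndices]

theorem pv_contains_ofList {α : Type} [BEq α] [LawfulBEq α] (R : List α) (x : α) :
    PySem.Set.contains (PySem.Set.ofList R) x = decide (x ∈ R) := by
  simp [PySem.Set.contains, List.contains_eq_mem, PySem.Set.mem_ofList]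

theorem pv_enumerate_map_range {α : Type} (r : Nat → α) (c : Nat) :
    PySem.List.enumerate ((List.range c).map r) 0 = (List.range c).map (fun (k : Nat) => ((k : Int), r k)) := by
  rw [PySem.List.enumerate_eq_zipIdx_map, List.zipIdx_map, pv_zipIdx_range, List.map_map, List.map_map]
  apply List.map_congr_left
  intro k _
  simp [Prod.map]

theorem pv_keep (L : List (List Char)) (start end_ s e : Int)
    (hsl : PySem.List.sliceIndices L.length (some start) (some end_) 2 = (s, e, 2))
    (hs0 : 0 ≤ s) (_he0 : 0 ≤ e) (hen : e ≤ (L.length : Int)) :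
    (PySem.List.enumerate (((PySem.List.slice? L (some start) (some end_) 2).getD []).map pvBlank) 0).foldl
        (fun acc p => acc.set (s + 2 * p.1).toNat p.2) L =
      (PySem.List.enumerate L 0).map
        (fun p => if PySem.Set.contains (PySem.Set.ofList (PySem.List.pyRange s e 2)) p.1 then pvBlank p.2 else p.2) := by
  have hslice : PySem.List.slice? L (some start) (some end_) 2
      = some ((List.range (if s < e then ((e - s + 2 - 1) / 2).toNat else 0)).filterMap
          (fun (k : Nat) => L[(s + 2 * (k : Int)).toNat]?)) := by
    simp only [PySem.List.slice?, hsl]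
    rw [if_neg (by decide : ¬(2 : Int) = 0), if_pos (by decide : (0 : Int) < 2)]
  set c := if s < e then ((e - s + 2 - 1) / 2).toNat else 0 with hc
  have hidx : ∀ k, k < c → (s + 2 * (k : Int)).toNat < L.length := by
    intro k hk
    rw [hc] at hk
    split_ifs at hk with hse <;> omega
  set r : Nat → List Char := fun k => pvBlank (L[(s + 2 * (k : Int)).toNat]?.getD []) with hr
  have hrepl : (((PySem.List.slice? L (some start) (some end_) 2).getD []).map pvBlank)
      = (List.range c).map r := by
    rw [hslice, Option.getD_some,
      pv_filterMap_eq_map _ _ (fun (k : Nat) => L[(s + 2 * (k : Int)).toNat]?.getD []) (by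
        intro k hkmem
        simp [List.getElem?_eq_getElem (hidx k (List.mem_range.mp hkmem))]), List.map_map]
    rfl
  rw [hrepl, pv_enumerate_map_range, List.foldl_map]
  set ps : List (Nat × List Char) := (List.range c).map (fun (k : Nat) => ((s + 2 * (k : Int)).toNat, r k)) with hps
  have hfold : (List.range c).foldl (fun acc k => acc.set (s + 2 * (k : Int)).toNat (r k)) L
      = ps.foldl (fun a p => a.set p.1 p.2) L := by
    rw [hps, List.foldl_map]
  rw [hfold]
  have hlt : ∀ p ∈ ps, p.1 < L.length := by
    intro p hp
    obtain ⟨k, hk, rfl⟩ := List.mem_map.mp hp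
    exact hidx k (List.mem_range.mp hk)
  have hnd : (ps.map Prod.fst).Nodup := by
    rw [hps, List.map_map]
    exact List.nodup_range.map (fun a b hab => by
      simp only [Function.comp_apply] at hab; omega)
  apply List.ext_getElem?
  intro j
  rw [pv_foldl_set_getElem? ps L j hlt hnd, List.getElem?_map, PySem.List.getElem?_enumerate,
    Option.map_map]
  have hmemiff : (((0 : Int) + (j : Int)) ∈ PySem.List.pyRange s e 2) ↔
      ∃ k, k < c ∧ (j : Int) = s + 2 * (k : Int) := by
    rw [PySem.List.pyRange_of_pos s e (by norm_num)]
    simp only [List.mem_map, List.mem_range]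
    constructor
    · rintro ⟨k, hk, hkj⟩; exact ⟨k, hk, by omega⟩
    · rintro ⟨k, hk, hkj⟩; exact ⟨k, hk, by omega⟩
  by_cases hj : j < L.length
  · by_cases hex : ∃ k, k < c ∧ (j : Int) = s + 2 * (k : Int)
    · obtain ⟨k0, hk0c, hk0⟩ := hex
      have hfind : ps.find? (fun p => p.1 == j) = some ((s + 2 * (k0 : Int)).toNat, r k0) := by
        apply pv_find?_eq_some_of_unique
        · exact List.mem_map_of_mem (List.mem_range.mpr hk0c)
        · simp only [beq_iff_eq]; omega
        · intro b hb hbq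
          obtain ⟨k, hk, rfl⟩ := List.mem_map.mp hb
          simp only [beq_iff_eq] at hbq
          have : k = k0 := by omega
          rw [this]
      rw [hfind]
      have hcont : PySem.Set.contains (PySem.Set.ofList (PySem.List.pyRange s e 2))
          ((0 : Int) + (j : Int)) = true := by
        rw [pv_contains_ofList]
        exact decide_eq_true (hmemiff.mpr ⟨k0, hk0c, hk0⟩)
      rw [List.getElem?_eq_getElem hj]
      simp only [Option.map_some, Function.comp_apply, hcont, if_pos]
      have hjk : (s + 2 * (k0 : Int)).toNat = j := by omega
      rw [hr]
      simp only [hjk, List.getElem?_eq_getElem hj]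
      rfl
    · have hfind : ps.find? (fun p => p.1 == j) = none := by
        rw [List.find?_eq_none]
        intro p hp hbq
        obtain ⟨k, hk, rfl⟩ := List.mem_map.mp hp
        simp only [beq_iff_eq] at hbq
        exact hex ⟨k, List.mem_range.mp hk, by omega⟩
      rw [hfind]
      have hcont : PySem.Set.contains (PySem.Set.ofList (PySem.List.pyRange s e 2))
          ((0 : Int) + (j : Int)) = false := by
        rw [pv_contains_ofList]
        exact decide_eq_false (fun h => hex (hmemiff.mp h))
      show L[j]? = _
      cases L[j]? with
      | none => rfl
      | some v => simp only [Option.map_some, Function.comp_apply, hcont, Bool.false_eq_true,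
          if_false]
  · have hnone : L[j]? = none := List.getElem?_eq_none (by omega)
    have hfind : ps.find? (fun p => p.1 == j) = none := by
      rw [List.find?_eq_none]
      intro p hp hbq
      have := hlt p hp
      simp only [beq_iff_eq] at hbq
      omega
    rw [hfind, hnone]
    rfl

theorem pv_del (L : List (List Char)) (s e : Int)
    (hs0 : 0 ≤ s) (_he0 : 0 ≤ e) (hen : e ≤ (L.length : Int)) :
    (PySem.List.pyRange s e 2).reverse.foldl (fun acc i => acc.eraseIdx i.toNat) L =
      ((PySem.List.enumerate L 0).filter
        (fun p => !PySem.Set.contains (PySem.Set.ofList (PySem.List.pyRange s e 2)) p.1)).map Prod.snd := by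
  set c := if s < e then ((e - s + 2 - 1) / 2).toNat else 0 with hc
  have hidx : ∀ k, k < c → (s + 2 * (k : Int)).toNat < L.length := by
    intro k hk
    rw [hc] at hk
    split_ifs at hk with hse <;> omega
  set T : List Nat := (List.range c).map (fun (k : Nat) => (s + 2 * (k : Int)).toNat) with hT
  have hrange : PySem.List.pyRange s e 2 = (List.range c).map (fun (k : Nat) => s + 2 * (k : Int)) :=
    PySem.List.pyRange_of_pos s e (by norm_num)
  have hLHS : (PySem.List.pyRange s e 2).reverse.foldl (fun acc i => acc.eraseIdx i.toNat) L
      = T.reverse.foldl (fun acc i => acc.eraseIdx i) L := by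
    rw [hrange, hT, ← List.map_reverse, ← List.map_reverse, List.foldl_map, List.foldl_map]
  rw [hLHS, pv_erase_desc T L (by
      rw [hT, List.pairwise_map]
      exact List.pairwise_lt_range.imp (fun {a b} hab => by omega)) (by
      intro i hi
      obtain ⟨k, hk, rfl⟩ := List.mem_map.mp hi
      exact hidx k (List.mem_range.mp hk))]
  rw [PySem.List.enumerate_eq_zipIdx_map, List.filter_map, List.map_map]
  have hpred : ∀ p ∈ L.zipIdx, ((fun p => !T.contains p.2) p)
      = ((fun q => !PySem.Set.contains (PySem.Set.ofList (PySem.List.pyRange s e 2)) q.1) ∘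
          (fun p => ((0 : Int) + (p.2 : Int), p.1))) p := by
    intro p _
    simp only [Function.comp_apply]
    congr 1
    rw [pv_contains_ofList, List.contains_eq_mem, hrange, hT]
    apply decide_eq_decide.mpr
    simp only [List.mem_map, List.mem_range]
    constructor
    · rintro ⟨k, hk, hkj⟩; exact ⟨k, hk, by omega⟩
    · rintro ⟨k, hk, hkj⟩; exact ⟨k, hk, by omega⟩
  rw [List.filter_congr hpred]
  simp [Function.comp]

theorem pv_main (t : String) (start end_ : Int) (keepblank : Bool) :
    del_line t start end_ keepblank = del_line_alt t start end_ keepblank := by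
  unfold del_line del_line_alt
  rcases hsl : PySem.List.sliceIndices (PySem.Chars.splitlines t.toList).length (some start) (some end_) 2
    with ⟨s, e, st⟩
  have hst : st = 2 := by
    have := pv_sliceIndices_step (PySem.Chars.splitlines t.toList).length (some start) (some end_)
    rw [hsl] at this; exact this
  subst hst
  have hfacts := pv_sliceIndices_facts (PySem.Chars.splitlines t.toList).length (some start) (some end_)
  rw [hsl] at hfacts
  obtain ⟨hs0, hsn, he0, hen⟩ := hfacts
  simp only [hsl]
  cases keepblank with
  | true =>
    rw [if_pos rfl, if_pos rfl]
    exact congrArg (fun l => String.ofList (PySem.Chars.join ['\n'] l))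
      (pv_keep _ start end_ s e hsl hs0 he0 hen)
  | false =>
    rw [if_neg Bool.false_ne_true, if_neg Bool.false_ne_true]
    exact congrArg (fun l => String.ofList (PySem.Chars.join ['\n'] l))
      (pv_del _ s e hs0 he0 hen)

-- ===== VERDICT (by name: the statement is the Claim_ definition above) =====
theorem del_line_spec : Claim_equal_del_line := by
  intro t start end_ keepblank _
  unfold Spec_del_line
  exact pv_main t start end_ keepblank
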